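-- pv_equiv track=rewrite | github.com/ethan-chang-nmc/code.practice | python/codio_recursion.py | filter_string
-- ===== SOURCE A (Python) =====
-- def filter_string(input):
--     vowels = ["a", "e", "i", "o", "u"]
--     if len(input) == 0:
--         return ""
--     else:
--         if input[0].lower() in vowels:
--           return input[0] + filter_string(input[1:])
--         else:
--           return filter_string(input[1:])
-- ===== SOURCE B (Python) =====
-- def filter_string(input):
--     vowels = {"a", "e", "i", "o", "u"}
--
--     def go(s):
--         # divide and conquer: filter each half and concatenate
--         if len(s) <= 1:
--             return s if s and s.lower() in vowels else ""
--         mid = len(s) // 2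
--         return go(s[:mid]) + go(s[mid:])
--
--     return go(input)
-- ===== Notes on version B (the rewrite author's own statement) =====
-- stated objective: faster
-- what changed: Replaces A's head/tail slicing recursion (each step copies the whole tail, O(n^2)) with a divide-and-conquer that splits the string at its midpoint, filters each half recursively, and concatenates the results (O(n log n)).
import Mathlib
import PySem

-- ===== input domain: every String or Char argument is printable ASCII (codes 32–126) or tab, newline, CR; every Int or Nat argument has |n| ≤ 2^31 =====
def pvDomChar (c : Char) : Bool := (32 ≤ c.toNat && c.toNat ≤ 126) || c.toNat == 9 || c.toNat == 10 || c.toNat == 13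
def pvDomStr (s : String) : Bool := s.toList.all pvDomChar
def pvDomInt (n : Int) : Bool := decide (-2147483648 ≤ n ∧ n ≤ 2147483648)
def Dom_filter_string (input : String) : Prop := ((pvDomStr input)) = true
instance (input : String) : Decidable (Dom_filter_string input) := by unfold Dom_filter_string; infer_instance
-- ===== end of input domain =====

-- B replaces A's head/tail recursion with a midpoint divide-and-conquer (alternative decomposition).

-- ===== PORT A =====
-- A recurses on the tail slice input[1:], prepending input[0] when its lowercase form is a vowel.
def filterA (l : List Char) : List Char :=
  match l with
  | [] => []
  | c :: rest =>
    if PySem.Chars.lowerChar c ∈ ['a', 'e', 'i', 'o', 'u'] then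
      c :: filterA rest
    else
      filterA rest

def filter_string (input : String) : String := String.ofList (filterA input.toList)

-- ===== PORT B =====
-- B: split at the midpoint, filter each half recursively, concatenate.
def filterB (l : List Char) : List Char :=
  if l.length ≤ 1 then
    match l with
    | [] => []
    | c :: _ => if PySem.Chars.lowerChar c ∈ ['a', 'e', 'i', 'o', 'u'] then [c] else []
  else
    filterB (l.take (l.length / 2)) ++ filterB (l.drop (l.length / 2))
termination_by l.length
decreasing_by
  · simp only [List.length_take]; omega
  · simp only [List.length_drop]; omega

def filter_string_alt (input : String) : String := String.ofList (filterB input.toList)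

-- ===== PRECONDITION & SPEC =====
def Spec_filter_string (input : String) (out : String) : Prop := out = filter_string_alt input
instance (input : String) (out : String) : Decidable (Spec_filter_string input out) := by unfold Spec_filter_string; infer_instance

-- ===== CLAIM (what is proved, stated in full; the proofs are below) =====
def Claim_equal_filter_string : Prop := ∀ (input : String), Dom_filter_string input → Spec_filter_string input (filter_string input)

-- ===== LEMMAS AND PROOFS =====
theorem filterA_append (l1 l2 : List Char) : filterA (l1 ++ l2) = filterA l1 ++ filterA l2 := by
  induction l1 with
  | nil => simp [filterA]
  | cons c rest ih =>
    simp only [List.cons_append, filterA]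
    split <;> simp [ih]

theorem filterB_eq (l : List Char) : filterB l = filterA l := by
  fun_induction filterB l with
  | case1 => rfl
  | case2 c rest hv hlen =>
    match rest, hlen with
    | [], _ => simp [filterA, hv]
  | case3 c rest hv hlen =>
    match rest, hlen with
    | [], _ => simp [filterA, hv]
  | case4 l hlen ih2 ih1 =>
    rw [ih1, ih2, ← filterA_append, List.take_append_drop]

-- ===== VERDICT (by name: the statement is the Claim_ definition above) =====
theorem filter_string_spec : Claim_equal_filter_string := by
  intro input _
  unfold Spec_filter_string filter_string filter_string_alt
  rw [filterB_eq]
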